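-- pv_equiv track=rewrite | github.com/posl/comment_recommendation | script/mod_gen/5_time/zh/279_A/1.py | count_vw
-- ===== SOURCE A (Python) =====
-- def count_vw(s):
--     count = 0
--     for i in range(len(s)):
--         if s[i] == "v":
--             for j in range(i+1, len(s)):
--                 if s[j] == "w":
--                     count += 1
--                 else:
--                     break
--     return count
-- ===== SOURCE B (Python) =====
-- def count_vw(s):
--     count = 0
--     active = False
--     for c in s:
--         if c == "v":
--             active = True
--         elif c == "w":
--             if active:
--                 count += 1
--         else:
--             active = False
--     return count
-- ===== Notes on version B (the rewrite author's own statement) =====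
-- stated objective: simpler
-- what changed: Replaced the nested index loop (re-scanning the w-run after every 'v' with an inner break loop) by a single pass over the characters maintaining one boolean state flag; no indexing and no inner loop.
import Mathlib
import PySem

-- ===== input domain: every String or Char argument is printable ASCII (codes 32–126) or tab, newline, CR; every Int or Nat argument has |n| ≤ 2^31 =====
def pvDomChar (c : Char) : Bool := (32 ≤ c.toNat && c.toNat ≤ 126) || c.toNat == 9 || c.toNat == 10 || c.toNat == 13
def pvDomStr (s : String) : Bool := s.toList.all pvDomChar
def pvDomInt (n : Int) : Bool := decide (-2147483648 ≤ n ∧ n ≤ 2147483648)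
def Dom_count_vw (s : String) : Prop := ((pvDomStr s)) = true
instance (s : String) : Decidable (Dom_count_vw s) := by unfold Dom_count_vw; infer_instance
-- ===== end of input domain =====

-- B replaces A's nested break-loop (re-scanning the w-run after each 'v') by one pass with a boolean flag; objective: simpler.


-- ===== PORT A =====
-- inner loop: for j in range(i+1, len(s)): if s[j]=='w': count+=1 else: break
def countRunA : List Char → Int
  | [] => 0
  | c :: t => if c = 'w' then 1 + countRunA t else 0

-- outer loop over every position i; at a 'v' the inner loop scans the chars after i
def goA : List Char → Int
  | [] => 0
  | c :: t => (if c = 'v' then countRunA t else 0) + goA t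

def count_vw (s : String) : Int := goA s.toList

-- ===== PORT B =====
-- single pass; state = (count, active)
def stepB (st : Int × Bool) (c : Char) : Int × Bool :=
  if c = 'v' then (st.1, true)
  else if c = 'w' then (if st.2 then (st.1 + 1, st.2) else st)
  else (st.1, false)

def count_vw_alt (s : String) : Int := (s.toList.foldl stepB (0, false)).1

-- ===== PRECONDITION & SPEC =====
def Spec_count_vw (s : String) (out : Int) : Prop := out = count_vw_alt s
instance (s : String) (out : Int) : Decidable (Spec_count_vw s out) := by unfold Spec_count_vw; infer_instance

-- ===== CLAIM =====
def Claim_equal_count_vw : Prop := ∀ (s : String), Dom_count_vw s → Spec_count_vw s (count_vw s)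

-- ===== LEMMAS AND PROOFS =====
-- remaining contribution of B's pass from state flag `act` over suffix l
def remB (act : Bool) : List Char → Int
  | [] => 0
  | c :: t =>
    if c = 'v' then remB true t
    else if c = 'w' then (if act then 1 + remB true t else remB false t)
    else remB false t

theorem remB_eq_goA (l : List Char) : ∀ act : Bool,
    remB act l = goA l + (if act then countRunA l else 0) := by
  induction l with
  | nil => intro act; cases act <;> simp [remB, goA, countRunA]
  | cons c t ih =>
    intro act
    by_cases hv : c = 'v'
    · cases act <;> simp [remB, goA, countRunA, hv, ih] <;> ring
    · by_cases hw : c = 'w'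
      · cases act <;> simp [remB, goA, countRunA, hv, hw, ih] <;> ring
      · cases act <;> simp [remB, goA, countRunA, hv, hw, ih]

theorem foldl_stepB (l : List Char) : ∀ (cnt : Int) (act : Bool),
    (l.foldl stepB (cnt, act)).1 = cnt + remB act l := by
  induction l with
  | nil => intro cnt act; simp [remB]
  | cons c t ih =>
    intro cnt act
    by_cases hv : c = 'v'
    · simp [List.foldl, stepB, remB, hv, ih]
    · by_cases hw : c = 'w'
      · cases act <;> simp [List.foldl, stepB, remB, hw, ih] <;> ring
      · simp [List.foldl, stepB, remB, hv, hw, ih]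

-- ===== VERDICT =====
theorem count_vw_spec : Claim_equal_count_vw := by
  intro s _
  unfold Spec_count_vw count_vw count_vw_alt
  rw [foldl_stepB, remB_eq_goA]
  simp
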